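-- pv_equiv track=rewrite | github.com/sambeard/PASS | Ruleset_module.py | comebackother
-- ===== SOURCE A (Python) =====
-- def comebackother(gamecourselist, homeaway):
--     differencelist = []
--     focusgoals = 0
--     othergoals = 0
--     #Get the goals for the focus team and other team
--     for eventidx, event in enumerate(gamecourselist):
--         if ((event['event'] == 'regular goal') and (event['team'] == homeaway)) or ((event['event'] == 'penalty goal') and (event['team'] == homeaway)) or ((event['event'] == 'own goal') and (event['team'] != homeaway)):
--             if 'player' in event:
--                 focusgoals += 1
--             else:
--                 focusgoals += 2
--         if ((event['event'] == 'regular goal') and (event['team'] != homeaway)) or ((event['event'] == 'penalty goal') and (event['team'] != homeaway)) or ((event['event'] == 'own goal') and (event['team'] == homeaway)):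
--             if 'player' in event:
--                 othergoals += 1
--             else:
--                 othergoals += 2
--         #And see how much more (or less) goals the other team has made
--         differencelist.append(othergoals - focusgoals)
--     try:
--         mindifference = min(differencelist)
--     except ValueError:
--         #A ValueError means a goalless match
--         return False
--     #If the difference at one point was 2 goals or more in favor of the focus team, it opens up the possibility for a comeback
--     if mindifference <= -2:
--         #If the other team has won, it is a comeback for the other team
--         if differencelist[-1] > 0:
--             return True
--         else:
--             return False
--     else:
--         return False
-- ===== SOURCE B (Python) =====
-- def comebackother(gamecourselist, homeaway):
--     # Staged: map events to signed goal deltas, total them, then a backward scan of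
--     # suffix sums: a comeback happened iff total > 0 and some proper suffix sum
--     # is at least total + 2 (equivalently, some prefix difference was <= -2).
--     def delta(event):
--         kind = event['event']
--         if kind == 'regular goal' or kind == 'penalty goal' or kind == 'own goal':
--             weight = 1 if 'player' in event else 2
--             return weight if (kind == 'own goal') == (event['team'] == homeaway) else -weight
--         return 0
--
--     ds = [delta(e) for e in gamecourselist]
--     total = sum(ds)
--     suf = 0
--     maxsuf = 0
--     for d in reversed(ds[1:]):
--         suf += d
--         maxsuf = max(maxsuf, suf)
--     return total > 0 and maxsuf >= total + 2
-- ===== Notes on version B (the rewrite author's own statement) =====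
-- stated objective: alternative
-- what changed: B first maps each event to a signed goal delta, totals them, and then detects the comeback by a backward scan of suffix sums (comeback iff total > 0 and some proper suffix sum >= total + 2), replacing A's forward prefix-difference list with its min() scan and [-1] lookup.
import Mathlib
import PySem

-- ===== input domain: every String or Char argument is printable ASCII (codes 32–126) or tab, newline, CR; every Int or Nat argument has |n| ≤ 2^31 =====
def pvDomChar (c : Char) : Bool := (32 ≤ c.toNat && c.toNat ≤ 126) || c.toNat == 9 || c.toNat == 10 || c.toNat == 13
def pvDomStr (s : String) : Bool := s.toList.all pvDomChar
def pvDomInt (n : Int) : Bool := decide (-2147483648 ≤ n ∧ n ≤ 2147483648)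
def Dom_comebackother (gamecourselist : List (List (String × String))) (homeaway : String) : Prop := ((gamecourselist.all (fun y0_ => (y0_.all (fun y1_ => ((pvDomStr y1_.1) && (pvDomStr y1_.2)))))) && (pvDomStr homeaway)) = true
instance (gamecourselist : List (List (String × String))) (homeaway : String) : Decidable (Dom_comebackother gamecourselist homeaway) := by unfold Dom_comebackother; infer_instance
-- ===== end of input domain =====

-- B detects the comeback from signed goal deltas by a backward suffix-sum scan
-- (comeback iff total > 0 and some proper suffix sum ≥ total + 2) instead of A's
-- forward prefix-difference list, min() scan and [-1] lookup (objective: alternative).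

-- ===== PORT A =====
-- A's loop body: the two goal-counting branches, then append othergoals - focusgoals.
def comebackotherStepA (homeaway : String) (s : List Int × Int × Int) (e : List (String × String)) : List Int × Int × Int :=
  let d := PySem.Dict.mk e
  let ev := d.getD "event" ""
  let tm := d.getD "team" ""
  let fg := if (ev == "regular goal" && tm == homeaway) || (ev == "penalty goal" && tm == homeaway) || (ev == "own goal" && tm != homeaway)
            then (if d.contains "player" then s.2.1 + 1 else s.2.1 + 2) else s.2.1
  let og := if (ev == "regular goal" && tm != homeaway) || (ev == "penalty goal" && tm != homeaway) || (ev == "own goal" && tm == homeaway)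
            then (if d.contains "player" then s.2.2 + 1 else s.2.2 + 2) else s.2.2
  (s.1 ++ [og - fg], fg, og)

def comebackother (gamecourselist : List (List (String × String))) (homeaway : String) : Bool :=
  match PySem.List.min? (gamecourselist.foldl (comebackotherStepA homeaway) ([], 0, 0)).1 (fun x => x) with
  | none => false            -- ValueError: goalless (empty) list
  | some m =>
    if m ≤ -2 then
      match PySem.List.pyGet? (gamecourselist.foldl (comebackotherStepA homeaway) ([], 0, 0)).1 (-1) with
      | some lastv => decide (lastv > 0)
      | none => false        -- unreachable: list nonempty here
    else false

-- ===== PORT B =====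
-- Source B's delta(event): the signed goal delta of one event
def cbDelta (homeaway : String) (e : List (String × String)) : Int :=
  let d := PySem.Dict.mk e
  let kind := d.getD "event" ""
  if kind == "regular goal" || kind == "penalty goal" || kind == "own goal" then
    let w : Int := if d.contains "player" then 1 else 2
    if (kind == "own goal") == (d.getD "team" "" == homeaway) then w else -w
  else 0

-- Source B's backward loop body: suf += d; maxsuf = max(maxsuf, suf)
def cbSufStep (s : Int × Int) (d : Int) : Int × Int := (s.1 + d, max s.2 (s.1 + d))

def comebackother_alt (gamecourselist : List (List (String × String))) (homeaway : String) : Bool :=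
  let ds := gamecourselist.map (cbDelta homeaway)
  let total := ds.sum
  let r := ((ds.drop 1).reverse).foldl cbSufStep (0, 0)
  decide (total > 0) && decide (r.2 ≥ total + 2)

-- ===== PRECONDITION & SPEC =====
-- Pre_ excludes exactly the inputs where A raises KeyError: an event without an 'event' key,
-- or a goal-typed event without a 'team' key (B raises KeyError there too).
def Pre_comebackother (gamecourselist : List (List (String × String))) (homeaway : String) : Prop :=
  ∀ e ∈ gamecourselist,
    (PySem.Dict.mk e).contains "event" = true ∧
    ((PySem.Dict.mk e).getD "event" "" ∈ (["regular goal", "penalty goal", "own goal"] : List String) →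
      (PySem.Dict.mk e).contains "team" = true)
instance (gamecourselist : List (List (String × String))) (homeaway : String) : Decidable (Pre_comebackother gamecourselist homeaway) := by unfold Pre_comebackother; infer_instance

def pvWitness_comebackother : (List (List (String × String))) × String :=
  ([[("event", "regular goal"), ("team", "home")]], "home")

def Spec_comebackother (gamecourselist : List (List (String × String))) (homeaway : String) (out : Bool) : Prop := out = comebackother_alt gamecourselist homeaway
instance (gamecourselist : List (List (String × String))) (homeaway : String) (out : Bool) : Decidable (Spec_comebackother gamecourselist homeaway out) := by unfold Spec_comebackother; infer_instance

-- ===== CLAIM (what is proved, stated in full; the proofs are below) =====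
def Claim_equal_comebackother : Prop := ∀ (gamecourselist : List (List (String × String))) (homeaway : String), Dom_comebackother gamecourselist homeaway → Pre_comebackother gamecourselist homeaway → Spec_comebackother gamecourselist homeaway (comebackother gamecourselist homeaway)

-- ===== LEMMAS AND PROOFS =====

-- forward prefix fold (proof device only): diff and running min of the prefix sums
def cbPreStep (s : Int × Int) (d : Int) : Int × Int := (s.1 + d, min s.2 (s.1 + d))

-- per-event change of A's (othergoals - focusgoals) is exactly B's delta, and the list grows by it
lemma stepA_eq (h : String) (s : List Int × Int × Int) (e : List (String × String)) :
    (comebackotherStepA h s e).2.2 - (comebackotherStepA h s e).2.1 = (s.2.2 - s.2.1) + cbDelta h e ∧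
    (comebackotherStepA h s e).1 = s.1 ++ [(s.2.2 - s.2.1) + cbDelta h e] := by
  simp only [comebackotherStepA, cbDelta]
  by_cases h1 : (PySem.Dict.mk e).getD "event" "" = "regular goal" <;>
  by_cases h2 : (PySem.Dict.mk e).getD "event" "" = "penalty goal" <;>
  by_cases h3 : (PySem.Dict.mk e).getD "event" "" = "own goal" <;>
  by_cases h4 : (PySem.Dict.mk e).getD "team" "" = h <;>
  by_cases h5 : (PySem.Dict.mk e).contains "player" = true <;>
    simp_all <;> omega

-- running-min bookkeeping
lemma foldl_min_shift (t : List Int) (a b : Int) :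
    t.foldl min (min a b) = min a (t.foldl min b) := by
  induction t generalizing b with
  | nil => rfl
  | cons x xs ih =>
    simp only [List.foldl_cons]
    rw [min_assoc, ih]

-- main loop invariant: the prefix fold over B's deltas tracks A's diff and running min of 0 :: differencelist
lemma fold_rel (h : String) : ∀ (es : List (List (String × String))) (dl : List Int) (fg og : Int),
    (es.map (cbDelta h)).foldl cbPreStep (og - fg, dl.foldl min 0) =
      ((es.foldl (comebackotherStepA h) (dl, fg, og)).2.2 - (es.foldl (comebackotherStepA h) (dl, fg, og)).2.1,
       (es.foldl (comebackotherStepA h) (dl, fg, og)).1.foldl min 0) := by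
  intro es
  induction es with
  | nil => intro dl fg og; rfl
  | cons e es ih =>
    intro dl fg og
    simp only [List.foldl_cons, List.map_cons]
    obtain ⟨hd, hl⟩ := stepA_eq h (dl, fg, og) e
    have ih' := ih (comebackotherStepA h (dl, fg, og) e).1
      (comebackotherStepA h (dl, fg, og) e).2.1 (comebackotherStepA h (dl, fg, og) e).2.2
    have e2 : ((comebackotherStepA h (dl, fg, og) e).1).foldl min 0
        = min (dl.foldl min 0) (og - fg + cbDelta h e) := by
      rw [hl]; simp [List.foldl_append]
    rw [hd, e2] at ih'
    exact ih'

-- A's differencelist ends with the current difference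
lemma fold_last (h : String) : ∀ (es : List (List (String × String))) (dl : List Int) (fg og : Int),
    (dl = [] ∨ dl.getLast? = some (og - fg)) →
    ((es.foldl (comebackotherStepA h) (dl, fg, og)).1 = [] ∨
      (es.foldl (comebackotherStepA h) (dl, fg, og)).1.getLast? =
        some ((es.foldl (comebackotherStepA h) (dl, fg, og)).2.2 - (es.foldl (comebackotherStepA h) (dl, fg, og)).2.1)) := by
  intro es
  induction es with
  | nil => intro dl fg og hinv; exact hinv
  | cons e es ih =>
    intro dl fg og _
    simp only [List.foldl_cons]
    obtain ⟨hd, hl⟩ := stepA_eq h (dl, fg, og) e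
    have ih' := ih (comebackotherStepA h (dl, fg, og) e).1
      (comebackotherStepA h (dl, fg, og) e).2.1 (comebackotherStepA h (dl, fg, og) e).2.2
    exact ih' (Or.inr (by rw [hd, hl]; simp))

-- A's differencelist never shrinks
lemma fold_nonempty (h : String) (es : List (List (String × String))) :
    ∀ (dl : List Int) (fg og : Int), dl ≠ [] →
    (es.foldl (comebackotherStepA h) (dl, fg, og)).1 ≠ [] := by
  induction es with
  | nil => intro dl fg og hne; exact hne
  | cons e es ih =>
    intro dl fg og hne
    simp only [List.foldl_cons]
    obtain ⟨_, hl⟩ := stepA_eq h (dl, fg, og) e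
    exact ih (comebackotherStepA h (dl, fg, og) e).1
      (comebackotherStepA h (dl, fg, og) e).2.1 (comebackotherStepA h (dl, fg, og) e).2.2
      (by rw [hl]; simp)

-- the prefix fold is translation-equivariant
lemma preStep_shift (xs : List Int) : ∀ (a m c : Int),
    xs.foldl cbPreStep (a + c, m + c) = ((xs.foldl cbPreStep (a, m)).1 + c, (xs.foldl cbPreStep (a, m)).2 + c) := by
  induction xs with
  | nil => intro a m c; rfl
  | cons x xs ih =>
    intro a m c
    simp only [List.foldl_cons, cbPreStep]
    have : a + c + x = (a + x) + c := by ring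
    rw [this, show min (m + c) (a + x + c) = min m (a + x) + c by omega]
    exact ih (a + x) (min m (a + x)) c

-- the min component of the prefix fold distributes over min in the initial accumulator
lemma preStep_min_init (xs : List Int) : ∀ (a m n : Int),
    (xs.foldl cbPreStep (a, min m n)).2 = min m (xs.foldl cbPreStep (a, n)).2 := by
  induction xs with
  | nil => intro a m n; rfl
  | cons x xs ih =>
    intro a m n
    simp only [List.foldl_cons, cbPreStep]
    rw [show min (min m n) (a + x) = min m (min n (a + x)) by omega]
    exact ih (a + x) m (min n (a + x))

-- cons formula for the min of prefix sums
lemma preStep_cons (x : Int) (xs : List Int) :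
    ((x :: xs).foldl cbPreStep (0, 0)).2 = min 0 (x + (xs.foldl cbPreStep (0, 0)).2) := by
  simp only [List.foldl_cons, cbPreStep, zero_add]
  have h1 : (xs.foldl cbPreStep (x, min 0 x)).2 = (xs.foldl cbPreStep (0, min (-x) 0)).2 + x := by
    have := preStep_shift xs 0 (min (-x) 0) x
    rw [show (0 : Int) + x = x by ring, show min (-x) 0 + x = min 0 x by omega] at this
    rw [this]
  have h2 : (xs.foldl cbPreStep (0, min (-x) 0)).2 = min (-x) (xs.foldl cbPreStep (0, 0)).2 :=
    preStep_min_init xs 0 (-x) 0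
  rw [h1, h2]; omega
-- the backward suffix fold equals (sum, sum - min of prefix sums)
lemma suf_rev (l : List Int) :
    l.reverse.foldl cbSufStep (0, 0) = (l.sum, l.sum - (l.foldl cbPreStep (0, 0)).2) := by
  induction l with
  | nil => rfl
  | cons x xs ih =>
    rw [List.reverse_cons, List.foldl_append, ih, preStep_cons x xs]
    simp only [List.foldl_cons, List.foldl_nil]
    simp only [cbSufStep, List.sum_cons, Prod.mk.injEq]
    exact ⟨by ring, by omega⟩

-- ===== VERDICT (by name: the statement is the Claim_ definition above) =====
theorem comebackother_spec : Claim_equal_comebackother := by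
  intro gcl h _ _
  unfold Spec_comebackother comebackother comebackother_alt
  cases gcl with
  | nil => rfl
  | cons e es =>
    -- A side: min of the differencelist and its last element
    have hrel := fold_rel h (e :: es) [] 0 0
    simp only [List.foldl_nil, sub_zero] at hrel
    have hlast := fold_last h (e :: es) [] 0 0 (Or.inl rfl)
    have hne : ((e :: es).foldl (comebackotherStepA h) ([], 0, 0)).1 ≠ [] := by
      simp only [List.foldl_cons]
      obtain ⟨_, hl0⟩ := stepA_eq h ([], 0, 0) e
      exact fold_nonempty h es (comebackotherStepA h ([], 0, 0) e).1
        (comebackotherStepA h ([], 0, 0) e).2.1 (comebackotherStepA h ([], 0, 0) e).2.2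
        (by rw [hl0]; simp)
    rcases hlast with hbad | hlast
    · exact absurd hbad hne
    -- B side: rewrite the suffix fold via suf_rev
    simp only [List.map_cons, List.drop_succ_cons, List.drop_zero]
    simp only [suf_rev]
    obtain ⟨x, t, hxt⟩ := List.exists_cons_of_ne_nil hne
    have hP : ((cbDelta h e :: es.map (cbDelta h)).foldl cbPreStep (0, 0)).2
        = min 0 (cbDelta h e + ((es.map (cbDelta h)).foldl cbPreStep (0, 0)).2) :=
      preStep_cons _ _
    have hfold := congrArg Prod.snd hrel
    have hfold1 := congrArg Prod.fst hrel
    simp only [List.map_cons] at hfold hfold1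
    rw [hxt] at hlast hfold ⊢
    rw [PySem.List.min?_id_cons, PySem.List.pyGet?_neg_one, hlast]
    have hmin : (x :: t).foldl min 0 = min 0 (t.foldl min x) := by
      simpa using foldl_min_shift t 0 x
    have hsum : (cbDelta h e :: es.map (cbDelta h)).sum
        = cbDelta h e + (es.map (cbDelta h)).sum := List.sum_cons
    -- the total of the deltas equals A's final difference
    have hsum1 : ∀ (l : List Int) (a m : Int), (l.foldl cbPreStep (a, m)).1 = a + l.sum := by
      intro l
      induction l with
      | nil => intro a m; simp
      | cons y ys ih2 => intro a m; simp only [List.foldl_cons, cbPreStep, ih2, List.sum_cons]; ring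
    have htot : (cbDelta h e :: es.map (cbDelta h)).sum
        = ((e :: es).foldl (comebackotherStepA h) ([], 0, 0)).2.2
          - ((e :: es).foldl (comebackotherStepA h) ([], 0, 0)).2.1 := by
      have h0 := hsum1 (cbDelta h e :: es.map (cbDelta h)) 0 0
      simp only [zero_add] at h0
      rw [← h0]; exact hfold1
    -- the min of the differencelist corresponds to the min of prefix sums of the deltas
    have hkey : min 0 (t.foldl min x)
        = min 0 (cbDelta h e + ((es.map (cbDelta h)).foldl cbPreStep (0, 0)).2) := by
      rw [← hmin, ← hfold, hP]
    rcases le_or_gt (t.foldl min x) (-2) with hm | hm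
    · have hc2 : (cbDelta h e :: es.map (cbDelta h)).sum + 2
          ≤ (es.map (cbDelta h)).sum - ((es.map (cbDelta h)).foldl cbPreStep (0, 0)).2 := by
        omega
      simp only [List.foldl_cons] at htot
      simp [hm, htot]
      all_goals omega
    · have hc2 : ¬ ((cbDelta h e :: es.map (cbDelta h)).sum + 2
          ≤ (es.map (cbDelta h)).sum - ((es.map (cbDelta h)).foldl cbPreStep (0, 0)).2) := by
        omega
      simp [show ¬ t.foldl min x ≤ -2 by omega]
      all_goals omega
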